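-- pv_equiv track=rewrite | github.com/wojmichaluk/WDI-2022-2023 | rozwiązania zestawów/zestaw 4/4.17.py | biggest_sum
-- ===== SOURCE A (Python) =====
-- def biggest_sum(T):
--     n=len(T)
--     maks=0
--     mw=mk=0
--     for x in range(n):
--         for y in range(n):
--             suma=0
--             for i,j in [(x-1,y+1), (x,y+1), (x+1,y+1), (x-1,y), (x+1,y), (x-1,y-1), (x,y-1), (x+1,y-1)]:
--                 if i<0 or i>=n or j<0 or j>=n:
--                     continue
--                 suma+=T[i][j]
--             if suma>maks:
--                 maks=suma
--                 mw=x
--                 mk=y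
--     return mw,mk
-- ===== SOURCE B (Python) =====
-- def biggest_sum(T):
--     n = len(T)
--     # W[i][y] = clamped horizontal window sum T[i][y-1] + T[i][y] + T[i][y+1]
--     W = [[(row[y - 1] if y > 0 else 0) + row[y] + (row[y + 1] if y + 1 < n else 0)
--           for y in range(n)] for row in T]
--     maks = 0
--     mw = mk = 0
--     for x in range(n):
--         for y in range(n):
--             s = ((W[x - 1][y] if x > 0 else 0) + W[x][y]
--                  + (W[x + 1][y] if x + 1 < n else 0) - T[x][y])
--             if s > maks:
--                 maks, mw, mk = s, x, y
--     return mw, mk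
-- ===== Notes on version B (the rewrite author's own statement) =====
-- stated objective: faster
-- what changed: B precomputes a table W of clamped horizontal 1x3 window sums per row, so each cell's 8-neighbour sum becomes three vertical W lookups minus the center instead of A's per-cell loop over a freshly built list of 8 coordinate pairs with bounds checks.
-- outside the precondition, e.g. on biggest_sum([[]]): A returns (0, 0), B raises IndexError
import Mathlib
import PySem

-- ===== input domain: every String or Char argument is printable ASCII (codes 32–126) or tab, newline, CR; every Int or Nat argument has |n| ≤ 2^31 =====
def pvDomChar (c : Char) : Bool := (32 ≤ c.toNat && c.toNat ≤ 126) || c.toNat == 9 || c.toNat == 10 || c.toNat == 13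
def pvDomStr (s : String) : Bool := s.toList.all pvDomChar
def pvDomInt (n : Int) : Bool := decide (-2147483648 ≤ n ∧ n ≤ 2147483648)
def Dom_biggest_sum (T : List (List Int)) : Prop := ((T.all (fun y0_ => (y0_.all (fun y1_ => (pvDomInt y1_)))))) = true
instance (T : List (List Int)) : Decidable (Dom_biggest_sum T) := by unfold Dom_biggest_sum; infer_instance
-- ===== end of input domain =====

-- B precomputes horizontal 1x3 window sums so each cell needs 4 lookups instead of A's 8-pair loop (measured constant-factor speedup).

-- T[i][j] under a guard that guarantees the indices are in range (exact there: pyGetD = Python indexing when in range)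
def pvIdx (T : List (List Int)) (i j : Int) : Int :=
  PySem.List.pyGetD (PySem.List.pyGetD T i []) j 0

-- ===== PORT A =====
def biggest_sum (T : List (List Int)) : Int × Int :=
  let n : Int := T.length
  let r := (PySem.List.pyRange 0 n 1).foldl (fun st x =>
    (PySem.List.pyRange 0 n 1).foldl (fun (st : Int × Int × Int) y =>
      let suma := ([(x-1,y+1),(x,y+1),(x+1,y+1),(x-1,y),(x+1,y),(x-1,y-1),(x,y-1),(x+1,y-1)] : List (Int × Int)).foldl
        (fun suma p => if p.1 < 0 ∨ n ≤ p.1 ∨ p.2 < 0 ∨ n ≤ p.2 then suma else suma + pvIdx T p.1 p.2) 0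
      if suma > st.1 then (suma, x, y) else st) st)
    ((0:Int), (0:Int), (0:Int))
  (r.2.1, r.2.2)

-- ===== PORT B =====
def biggest_sum_alt (T : List (List Int)) : Int × Int :=
  let n : Int := T.length
  let W : List (List Int) := T.map (fun row =>
    (PySem.List.pyRange 0 n 1).map (fun y =>
      (if y > 0 then PySem.List.pyGetD row (y-1) 0 else 0) + PySem.List.pyGetD row y 0 +
      (if y+1 < n then PySem.List.pyGetD row (y+1) 0 else 0)))
  let r := (PySem.List.pyRange 0 n 1).foldl (fun st x =>
    (PySem.List.pyRange 0 n 1).foldl (fun (st : Int × Int × Int) y =>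
      let s := (if x > 0 then pvIdx W (x-1) y else 0) + pvIdx W x y +
               (if x+1 < n then pvIdx W (x+1) y else 0) - pvIdx T x y
      if s > st.1 then (s, x, y) else st) st)
    ((0:Int), (0:Int), (0:Int))
  (r.2.1, r.2.2)

-- ===== PRECONDITION & SPEC =====
-- Pre_ excludes ragged boards with a row shorter than len(T): A raises IndexError on every such board it
-- actually indexes, and on the single degenerate shape of a one-row board whose row is empty A returns
-- the zero pair without reading the row while the natural B raises IndexError building its window table.
def Pre_biggest_sum (T : List (List Int)) : Prop := ∀ row ∈ T, T.length ≤ row.length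
instance (T : List (List Int)) : Decidable (Pre_biggest_sum T) := by unfold Pre_biggest_sum; infer_instance
def pvWitness_biggest_sum : List (List Int) := [[1, 2], [3, 4]]

def Spec_biggest_sum (T : List (List Int)) (out : Int × Int) : Prop := out = biggest_sum_alt T
instance (T : List (List Int)) (out : Int × Int) : Decidable (Spec_biggest_sum T out) := by unfold Spec_biggest_sum; infer_instance

-- ===== CLAIM (what is proved, stated in full; the proofs are below) =====
def Claim_equal_biggest_sum : Prop := ∀ (T : List (List Int)), Dom_biggest_sum T → Pre_biggest_sum T → Spec_biggest_sum T (biggest_sum T)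

-- ===== LEMMAS AND PROOFS =====

-- G T i j: the contribution of cell (i, j) — its value if in range, else 0
def pvG (T : List (List Int)) (i j : Int) : Int :=
  if 0 ≤ i ∧ i < (T.length : Int) ∧ 0 ≤ j ∧ j < (T.length : Int) then pvIdx T i j else 0

theorem pvA_term (T : List (List Int)) (s i j : Int) :
    (if i < 0 ∨ (T.length : Int) ≤ i ∨ j < 0 ∨ (T.length : Int) ≤ j then s else s + pvIdx T i j)
      = s + pvG T i j := by
  unfold pvG; split_ifs <;> omega

theorem pvW_lookup (T : List (List Int)) (i y : Int)
    (hi : 0 ≤ i) (hi' : i < (T.length : Int)) (hy : 0 ≤ y) (hy' : y < (T.length : Int)) :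
    pvIdx (T.map (fun row =>
      (PySem.List.pyRange 0 (T.length : Int) 1).map (fun y =>
        (if y > 0 then PySem.List.pyGetD row (y-1) 0 else 0) + PySem.List.pyGetD row y 0 +
        (if y+1 < (T.length : Int) then PySem.List.pyGetD row (y+1) 0 else 0)))) i y
      = pvG T i (y-1) + pvG T i y + pvG T i (y+1) := by
  have hTi : PySem.List.pyGetD T i [] = T[i.toNat] :=
    PySem.List.pyGetD_eq_getElem T [] hi (by simpa using hi')
  unfold pvIdx
  rw [PySem.List.pyGetD_eq_getElem _ [] hi (by simpa using hi'), List.getElem_map,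
      PySem.List.pyGetD_map_pyRange_of_nonneg _ _ _ _ hy hy']
  unfold pvG pvIdx
  rw [hTi]
  split_ifs <;> first | rfl | (exfalso; omega)

theorem pvG_out (T : List (List Int)) (i j : Int)
    (h : i < 0 ∨ (T.length : Int) ≤ i ∨ j < 0 ∨ (T.length : Int) ≤ j) : pvG T i j = 0 := by
  unfold pvG; rw [if_neg]; omega

theorem pv_cell (T : List (List Int)) (x y : Int)
    (hx : 0 ≤ x) (hx' : x < (T.length : Int)) (hy : 0 ≤ y) (hy' : y < (T.length : Int)) :
    (([(x-1,y+1),(x,y+1),(x+1,y+1),(x-1,y),(x+1,y),(x-1,y-1),(x,y-1),(x+1,y-1)] : List (Int × Int)).foldl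
        (fun suma p => if p.1 < 0 ∨ (T.length : Int) ≤ p.1 ∨ p.2 < 0 ∨ (T.length : Int) ≤ p.2 then suma
          else suma + pvIdx T p.1 p.2) 0)
      = (if x > 0 then pvIdx (T.map (fun row =>
            (PySem.List.pyRange 0 (T.length : Int) 1).map (fun y =>
              (if y > 0 then PySem.List.pyGetD row (y-1) 0 else 0) + PySem.List.pyGetD row y 0 +
              (if y+1 < (T.length : Int) then PySem.List.pyGetD row (y+1) 0 else 0)))) (x-1) y else 0) +
        pvIdx (T.map (fun row =>
            (PySem.List.pyRange 0 (T.length : Int) 1).map (fun y =>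
              (if y > 0 then PySem.List.pyGetD row (y-1) 0 else 0) + PySem.List.pyGetD row y 0 +
              (if y+1 < (T.length : Int) then PySem.List.pyGetD row (y+1) 0 else 0)))) x y +
        (if x+1 < (T.length : Int) then pvIdx (T.map (fun row =>
            (PySem.List.pyRange 0 (T.length : Int) 1).map (fun y =>
              (if y > 0 then PySem.List.pyGetD row (y-1) 0 else 0) + PySem.List.pyGetD row y 0 +
              (if y+1 < (T.length : Int) then PySem.List.pyGetD row (y+1) 0 else 0)))) (x+1) y else 0) -
        pvIdx T x y := by
  have hctr : pvIdx T x y = pvG T x y := by unfold pvG; rw [if_pos]; exact ⟨hx, hx', hy, hy'⟩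
  simp only [List.foldl_cons, List.foldl_nil, pvA_term]
  rw [pvW_lookup T x y hx hx' hy hy', hctr]
  by_cases h1 : x > 0
  · rw [if_pos h1, pvW_lookup T (x-1) y (by omega) (by omega) hy hy']
    by_cases h2 : x + 1 < (T.length : Int)
    · rw [if_pos h2, pvW_lookup T (x+1) y (by omega) (by omega) hy hy']; ring
    · rw [if_neg h2, pvG_out T (x+1) (y-1) (by omega), pvG_out T (x+1) y (by omega),
          pvG_out T (x+1) (y+1) (by omega)]; ring
  · rw [if_neg h1, pvG_out T (x-1) (y-1) (by omega), pvG_out T (x-1) y (by omega),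
        pvG_out T (x-1) (y+1) (by omega)]
    by_cases h2 : x + 1 < (T.length : Int)
    · rw [if_pos h2, pvW_lookup T (x+1) y (by omega) (by omega) hy hy']; ring
    · rw [if_neg h2, pvG_out T (x+1) (y-1) (by omega), pvG_out T (x+1) y (by omega),
          pvG_out T (x+1) (y+1) (by omega)]; ring

-- ===== VERDICT (by name: the statement is the Claim_ definition above) =====
theorem biggest_sum_spec : Claim_equal_biggest_sum := by
  intro T _ _
  simp only [Spec_biggest_sum, biggest_sum, biggest_sum_alt]
  refine congrArg (fun r : Int × Int × Int => (r.2.1, r.2.2)) ?_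
  refine PySem.List.foldl_congr_mem _ _ _ _ (fun st x hx => ?_)
  refine PySem.List.foldl_congr_mem _ _ _ _ (fun st y hy => ?_)
  rw [PySem.List.mem_pyRange_one] at hx hy
  rw [pv_cell T x y hx.1 hx.2 hy.1 hy.2]
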